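-- pv_equiv track=rewrite | github.com/sin0105/fun411-1- | week10/cat.py | cat_altar
-- ===== SOURCE A (Python) =====
-- cat_l = \
--     ''' ／|、    |
-- (°、。7   |
--  |、 ~ヽ  |
--  ᒐᒐ_f_ )ノ|
-- __________|
-- '''
--
-- cat_r = \
--     '''| ／|、
-- |(°、。7
-- | |、 ~ヽ
-- | ᒐᒐ_f_ )ノ
-- |__________
-- '''
--
-- cat_f = \
--     ''' ／|、
-- (°、。7
--  |、 ~ヽ
--  ᒐᒐ_f_ )ノ
-- __________
-- '''
--
-- def cat_altar(n):
--     result = ''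
--     cat_1 = '+'*(((n-1)*10)+(n-1)) + cat_f[:9] + '+'*(((n-1)*10)+(n-1))+ cat_f[9:18] + \
--             '+'*(((n-1)*10)+(n-1)) + cat_f[18:27] +'+'*(((n-1)*10)+(n-1)) +cat_f[27:37] + \
--             '+'*(((n-1)*10)+(n-1)) +cat_f[37:]
--
--
--     for i in range(1,n):
--         cat_m = '+'*(((n-(i+1))*10)+(n-(i+1))) + cat_l[:9] + '+'*((10*((2*i)-1)) + ((2*i)-2)) +cat_r[:9]+cat_l[9]+ \
--                 '+'*(((n-(i+1))*10)+(n-(i+1)))+cat_l[10:19] + '+'*((10*((2*i)-1)) + ((2*i)-2)) + cat_r[10:19]+ cat_l[19]+\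
--                 '+'*(((n-(i+1))*10)+(n-(i+1)))+cat_l[20:29] +'+'*((10*((2*i)-1)) + ((2*i)-2)) + cat_r[20:29] +cat_l[29]+\
--                 '+'*(((n-(i+1))*10)+(n-(i+1)))+cat_l[30:40] + '+'*((10*((2*i)-1)) + ((2*i)-2))+ cat_r[30:40] +cat_l[40]+\
--                 '+'*(((n-(i+1))*10)+(n-(i+1)))+cat_l[41:52] + '+'*((10*((2*i)-1)) + ((2*i)-2)) + cat_r[41:]
--         result = result + cat_m
--
--     return cat_1.replace('+'," ") + result.replace('+'," ")
-- ===== SOURCE B (Python) =====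
-- def cat_altar(n):
--     # Build the picture line by line: a list of complete rows, then glue them.
--     F = [' ／|、    ', '(°、。7   ', ' |、 ~ヽ  ', ' ᒐᒐ_f_ )ノ', '__________']
--     L = [f + '|' for f in F]          # left cat: template line plus right wall
--     R = ['|' + f for f in F]          # right cat: left wall plus template line
--     lines = [' ' * (11 * (n - 1)) + f for f in F]
--     for i in range(1, n):
--         pad = ' ' * (11 * (n - 1 - i))
--         gap = ' ' * (11 * (2 * i - 1) - 1)
--         lines += [pad + l + gap + r for l, r in zip(L, R)]
--     return ''.join(line + '\n' for line in lines)
-- ===== Notes on version B (the rewrite author's own statement) =====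
-- stated objective: simpler
-- what changed: B builds the picture as a list of complete text lines (template lines plus computed space padding per level) and joins them, instead of A's index-slice concatenation with '+'-placeholder padding followed by a global replace('+', ' ').
import Mathlib
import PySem

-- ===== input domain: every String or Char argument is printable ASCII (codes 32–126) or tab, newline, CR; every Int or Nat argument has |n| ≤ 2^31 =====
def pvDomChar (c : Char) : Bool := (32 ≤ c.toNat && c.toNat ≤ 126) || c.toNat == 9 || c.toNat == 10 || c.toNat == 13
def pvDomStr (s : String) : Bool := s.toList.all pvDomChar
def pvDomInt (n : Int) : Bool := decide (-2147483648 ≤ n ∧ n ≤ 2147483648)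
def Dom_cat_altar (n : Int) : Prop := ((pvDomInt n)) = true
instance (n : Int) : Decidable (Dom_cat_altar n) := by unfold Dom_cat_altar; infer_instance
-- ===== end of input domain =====

-- B replaces A's padding-arithmetic '+'-placeholder/replace concatenation by building the picture
-- as a list of complete lines (row by row) that is joined at the end (objective: simpler).

-- ===== PORT A =====
-- the module-level cat strings, kept as List Char (Python str slicing is by code point)
def pvCatL : List Char := " ／|、    |\n(°、。7   |\n |、 ~ヽ  |\n ᒐᒐ_f_ )ノ|\n__________|\n".toList
def pvCatR : List Char := "| ／|、    \n|(°、。7   \n| |、 ~ヽ  \n| ᒐᒐ_f_ )ノ\n|__________\n".toList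
def pvCatF : List Char := " ／|、    \n(°、。7   \n |、 ~ヽ  \n ᒐᒐ_f_ )ノ\n__________\n".toList

-- Python 'cat_l[9]' (a literal index into a constant string, always in range) is ported as the
-- one-character slice cat_l[9:10], which is exactly the same one-character string here.
def cat_altar (n : Int) : String :=
  let plus := fun (k : Int) => PySem.List.pyRepeat ['+'] k
  let cat1 :=
    plus ((n-1)*10+(n-1)) ++ PySem.List.slice pvCatF none (some 9)
    ++ plus ((n-1)*10+(n-1)) ++ PySem.List.slice pvCatF (some 9) (some 18)
    ++ plus ((n-1)*10+(n-1)) ++ PySem.List.slice pvCatF (some 18) (some 27)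
    ++ plus ((n-1)*10+(n-1)) ++ PySem.List.slice pvCatF (some 27) (some 37)
    ++ plus ((n-1)*10+(n-1)) ++ PySem.List.slice pvCatF (some 37) none
  let result := (PySem.List.pyRange 1 n 1).foldl (fun res i =>
    res ++ (plus ((n-(i+1))*10+(n-(i+1))) ++ PySem.List.slice pvCatL none (some 9)
      ++ plus ((10*((2*i)-1)) + ((2*i)-2)) ++ PySem.List.slice pvCatR none (some 9)
      ++ PySem.List.slice pvCatL (some 9) (some 10)
      ++ plus ((n-(i+1))*10+(n-(i+1))) ++ PySem.List.slice pvCatL (some 10) (some 19)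
      ++ plus ((10*((2*i)-1)) + ((2*i)-2)) ++ PySem.List.slice pvCatR (some 10) (some 19)
      ++ PySem.List.slice pvCatL (some 19) (some 20)
      ++ plus ((n-(i+1))*10+(n-(i+1))) ++ PySem.List.slice pvCatL (some 20) (some 29)
      ++ plus ((10*((2*i)-1)) + ((2*i)-2)) ++ PySem.List.slice pvCatR (some 20) (some 29)
      ++ PySem.List.slice pvCatL (some 29) (some 30)
      ++ plus ((n-(i+1))*10+(n-(i+1))) ++ PySem.List.slice pvCatL (some 30) (some 40)
      ++ plus ((10*((2*i)-1)) + ((2*i)-2)) ++ PySem.List.slice pvCatR (some 30) (some 40)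
      ++ PySem.List.slice pvCatL (some 40) (some 41)
      ++ plus ((n-(i+1))*10+(n-(i+1))) ++ PySem.List.slice pvCatL (some 41) (some 52)
      ++ plus ((10*((2*i)-1)) + ((2*i)-2)) ++ PySem.List.slice pvCatR (some 41) none)) []
  String.mk (PySem.Chars.replace cat1 ['+'] [' '] ++ PySem.Chars.replace result ['+'] [' '])

-- ===== PORT B =====
-- the five template lines of the front cat (Source B's F)
def pvF1 : List Char := " ／|、    ".toList
def pvF2 : List Char := "(°、。7   ".toList
def pvF3 : List Char := " |、 ~ヽ  ".toList
def pvF4 : List Char := " ᒐᒐ_f_ )ノ".toList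
def pvF5 : List Char := "__________".toList
def pvLinesF : List (List Char) := [pvF1, pvF2, pvF3, pvF4, pvF5]

def cat_altar_alt (n : Int) : String :=
  let F := pvLinesF
  let L := F.map (fun f => f ++ ['|'])
  let R := F.map (fun f => '|' :: f)
  let lines0 := F.map (fun f => PySem.List.pyRepeat [' '] (11*(n-1)) ++ f)
  let lines := (PySem.List.pyRange 1 n 1).foldl (fun ls i =>
    ls ++ (L.zip R).map (fun p =>
      PySem.List.pyRepeat [' '] (11*(n-1-i)) ++ p.1
        ++ PySem.List.pyRepeat [' '] (11*(2*i-1)-1) ++ p.2)) lines0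
  String.mk (PySem.Chars.join [] (lines.map (fun line => line ++ ['\n'])))

-- ===== PRECONDITION & SPEC =====
def Spec_cat_altar (n : Int) (out : String) : Prop := out = cat_altar_alt n
instance (n : Int) (out : String) : Decidable (Spec_cat_altar n out) := by unfold Spec_cat_altar; infer_instance

-- ===== CLAIM (what is proved, stated in full; the proofs are below) =====
def Claim_equal_cat_altar : Prop := ∀ (n : Int), Dom_cat_altar n → Spec_cat_altar n (cat_altar n)

-- ===== LEMMAS AND PROOFS =====

-- the character substitution that str.replace('+', ' ') performs
def pvSub (c : Char) : Char := if c == '+' then ' ' else c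

theorem pvReplace_go_plus (fuel : Nat) (l acc : List Char) (h : l.length ≤ fuel) :
    PySem.Chars.replace.go ['+'] [' '] fuel l acc = acc.reverse ++ l.map pvSub := by
  induction fuel generalizing l acc with
  | zero =>
    have hl : l = [] := List.length_eq_zero_iff.mp (Nat.le_zero.mp h)
    simp [hl, PySem.Chars.replace.go]
  | succ fuel ih =>
    cases l with
    | nil => simp [PySem.Chars.replace.go]
    | cons c t =>
      by_cases hc : c = '+'
      · subst hc
        simp [PySem.Chars.replace.go, List.isPrefixOf, ih t (' ' :: acc) (by simpa using h), pvSub]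
      · simp [PySem.Chars.replace.go, List.isPrefixOf, hc, ih t (c :: acc) (by simpa using h), pvSub]
        exact fun hcc => absurd hcc.symm hc

theorem pvReplace_plus (s : List Char) :
    PySem.Chars.replace s ['+'] [' '] = s.map pvSub := by
  simpa [PySem.Chars.replace] using pvReplace_go_plus s.length s [] le_rfl

theorem pvJoin_nil (xs : List (List Char)) : PySem.Chars.join [] xs = xs.flatten := by
  induction xs with
  | nil => rfl
  | cons a t ih =>
    cases t with
    | nil => simp [PySem.Chars.join, List.intercalate]
    | cons b u =>
      simp only [PySem.Chars.join, List.intercalate, List.intersperse] at ih ⊢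
      simp_all

-- the top block (front cat), with the padding width abstracted
theorem pvTopEq (k : Int) :
    List.map pvSub
      (PySem.List.pyRepeat ['+'] k ++ PySem.List.slice pvCatF none (some 9)
       ++ PySem.List.pyRepeat ['+'] k ++ PySem.List.slice pvCatF (some 9) (some 18)
       ++ PySem.List.pyRepeat ['+'] k ++ PySem.List.slice pvCatF (some 18) (some 27)
       ++ PySem.List.pyRepeat ['+'] k ++ PySem.List.slice pvCatF (some 27) (some 37)
       ++ PySem.List.pyRepeat ['+'] k ++ PySem.List.slice pvCatF (some 37) none)
    = ((pvLinesF.map (fun f => PySem.List.pyRepeat [' '] k ++ f)).map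
        (fun line => line ++ ['\n'])).flatten := by
  have s1 : PySem.List.slice pvCatF none (some 9) = pvF1 ++ ['\n'] := by decide
  have s2 : PySem.List.slice pvCatF (some 9) (some 18) = pvF2 ++ ['\n'] := by decide
  have s3 : PySem.List.slice pvCatF (some 18) (some 27) = pvF3 ++ ['\n'] := by decide
  have s4 : PySem.List.slice pvCatF (some 27) (some 37) = pvF4 ++ ['\n'] := by decide
  have s5 : PySem.List.slice pvCatF (some 37) none = pvF5 ++ ['\n'] := by decide
  have m1 : List.map pvSub pvF1 = pvF1 := by decide
  have m2 : List.map pvSub pvF2 = pvF2 := by decide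
  have m3 : List.map pvSub pvF3 = pvF3 := by decide
  have m4 : List.map pvSub pvF4 = pvF4 := by decide
  have m5 : List.map pvSub pvF5 = pvF5 := by decide
  simp [pvLinesF, s1, s2, s3, s4, s5, m1, m2, m3, m4, m5, pvSub, List.append_assoc]

-- one pyramid level, with the two padding widths abstracted
theorem pvRowEq (a g : Int) :
    List.map pvSub
      (PySem.List.pyRepeat ['+'] a ++ PySem.List.slice pvCatL none (some 9)
       ++ PySem.List.pyRepeat ['+'] g ++ PySem.List.slice pvCatR none (some 9)
       ++ PySem.List.slice pvCatL (some 9) (some 10)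
       ++ PySem.List.pyRepeat ['+'] a ++ PySem.List.slice pvCatL (some 10) (some 19)
       ++ PySem.List.pyRepeat ['+'] g ++ PySem.List.slice pvCatR (some 10) (some 19)
       ++ PySem.List.slice pvCatL (some 19) (some 20)
       ++ PySem.List.pyRepeat ['+'] a ++ PySem.List.slice pvCatL (some 20) (some 29)
       ++ PySem.List.pyRepeat ['+'] g ++ PySem.List.slice pvCatR (some 20) (some 29)
       ++ PySem.List.slice pvCatL (some 29) (some 30)
       ++ PySem.List.pyRepeat ['+'] a ++ PySem.List.slice pvCatL (some 30) (some 40)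
       ++ PySem.List.pyRepeat ['+'] g ++ PySem.List.slice pvCatR (some 30) (some 40)
       ++ PySem.List.slice pvCatL (some 40) (some 41)
       ++ PySem.List.pyRepeat ['+'] a ++ PySem.List.slice pvCatL (some 41) (some 52)
       ++ PySem.List.pyRepeat ['+'] g ++ PySem.List.slice pvCatR (some 41) none)
    = ((((pvLinesF.map (fun f => f ++ ['|'])).zip (pvLinesF.map (fun f => '|' :: f))).map
         (fun p => PySem.List.pyRepeat [' '] a ++ p.1
           ++ PySem.List.pyRepeat [' '] g ++ p.2)).map
        (fun line => line ++ ['\n'])).flatten := by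
  have l1 : PySem.List.slice pvCatL none (some 9) = pvF1 ++ ['|'] := by decide
  have l2 : PySem.List.slice pvCatL (some 10) (some 19) = pvF2 ++ ['|'] := by decide
  have l3 : PySem.List.slice pvCatL (some 20) (some 29) = pvF3 ++ ['|'] := by decide
  have l4 : PySem.List.slice pvCatL (some 30) (some 40) = pvF4 ++ ['|'] := by decide
  have l5 : PySem.List.slice pvCatL (some 41) (some 52) = pvF5 ++ ['|'] := by decide
  have n1 : PySem.List.slice pvCatL (some 9) (some 10) = ['\n'] := by decide
  have n2 : PySem.List.slice pvCatL (some 19) (some 20) = ['\n'] := by decide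
  have n3 : PySem.List.slice pvCatL (some 29) (some 30) = ['\n'] := by decide
  have n4 : PySem.List.slice pvCatL (some 40) (some 41) = ['\n'] := by decide
  have r1 : PySem.List.slice pvCatR none (some 9) = '|' :: pvF1 := by decide
  have r2 : PySem.List.slice pvCatR (some 10) (some 19) = '|' :: pvF2 := by decide
  have r3 : PySem.List.slice pvCatR (some 20) (some 29) = '|' :: pvF3 := by decide
  have r4 : PySem.List.slice pvCatR (some 30) (some 40) = '|' :: pvF4 := by decide
  have r5 : PySem.List.slice pvCatR (some 41) none = ('|' :: pvF5) ++ ['\n'] := by decide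
  have m1 : List.map pvSub pvF1 = pvF1 := by decide
  have m2 : List.map pvSub pvF2 = pvF2 := by decide
  have m3 : List.map pvSub pvF3 = pvF3 := by decide
  have m4 : List.map pvSub pvF4 = pvF4 := by decide
  have m5 : List.map pvSub pvF5 = pvF5 := by decide
  simp [pvLinesF, l1, l2, l3, l4, l5, n1, n2, n3, n4, r1, r2, r3, r4, r5,
        m1, m2, m3, m4, m5, pvSub, List.append_assoc]

-- ===== VERDICT (by name: the statement is the Claim_ definition above) =====
theorem pvFlatten_flatMap (l : List Int) (f : Int → List (List Char)) :
    (l.flatMap f).flatten = l.flatMap (fun x => (f x).flatten) := by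
  induction l with
  | nil => rfl
  | cons a t ih => simp [ih]

set_option maxHeartbeats 2000000 in
theorem cat_altar_spec : Claim_equal_cat_altar := by
  intro n _
  show cat_altar n = cat_altar_alt n
  simp only [cat_altar, cat_altar_alt]
  rw [PySem.List.foldl_append_eq_flatMap, PySem.List.foldl_append_eq_flatMap]
  rw [pvReplace_plus, pvReplace_plus, pvJoin_nil]
  congr 1
  conv_rhs => rw [List.map_append, List.flatten_append, List.map_flatMap, pvFlatten_flatMap]
  conv_lhs => rw [List.nil_append, List.map_flatMap]
  refine congrArg₂ (· ++ ·) ?_ ?_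
  · have h : (n-1)*10+(n-1) = 11*(n-1) := by ring
    rw [h]
    exact pvTopEq (11*(n-1))
  · apply List.flatMap_congr
    intro i _
    have ha : (n-(i+1))*10+(n-(i+1)) = 11*(n-1-i) := by ring
    have hg : (10*((2*i)-1)) + ((2*i)-2) = 11*(2*i-1)-1 := by ring
    simpa [ha, hg, Function.comp] using pvRowEq (11*(n-1-i)) (11*(2*i-1)-1)
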